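-- pv_equiv track=rewrite | github.com/dorinclisu/algotest | strings.py | repr_is_equal
-- ===== SOURCE A (Python) =====
-- def repr_is_equal(s1, s2):
--     n1 = len(s1)
--     n2 = len(s2)
--
--     i1 = 0
--     i2 = 0
--
--     while True:
--         if s1[i1] != s2[i2]:
--             return False
--
--         if i1 == n1-1 and i2 == n2-1:
--             return True # we finished both strings and found no mismatch
--
--         # advance i1 index until the next different character or end of string
--         for i1 in range(i1+1, n1):
--             if s1[i1] != s1[i1-1]:
--                 break
--
--         # advance i2 index until the next different character or end of string
--         for i2 in range(i2+1, n2):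
--             if s2[i2] != s2[i2-1]:
--                 break
-- ===== SOURCE B (Python) =====
-- def repr_is_equal(s1, s2):
--     def collapse(s):
--         out = s[0]
--         for ch in s[1:]:
--             if ch != out[-1]:
--                 out += ch
--         return out
--     return collapse(s1) == collapse(s2)
-- ===== Notes on version B (the rewrite author's own statement) =====
-- stated objective: simpler
-- what changed: Replaces A's interleaved two-pointer run-skipping scan over both strings with a helper that run-collapses each string independently and a single comparison of the two collapsed strings.
import Mathlib
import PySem

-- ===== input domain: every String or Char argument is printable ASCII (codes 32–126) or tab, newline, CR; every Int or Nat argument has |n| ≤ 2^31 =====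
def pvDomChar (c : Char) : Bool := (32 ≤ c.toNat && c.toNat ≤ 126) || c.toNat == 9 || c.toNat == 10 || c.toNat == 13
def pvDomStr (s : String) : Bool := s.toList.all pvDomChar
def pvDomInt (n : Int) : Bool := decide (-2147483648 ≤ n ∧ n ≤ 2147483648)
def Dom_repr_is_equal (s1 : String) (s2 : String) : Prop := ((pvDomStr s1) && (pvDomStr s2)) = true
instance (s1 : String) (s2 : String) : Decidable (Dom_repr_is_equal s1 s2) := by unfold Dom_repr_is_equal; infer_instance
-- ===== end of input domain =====

-- B replaces A's interleaved two-pointer run-skipping scan with independent run-collapsing of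
-- each string plus one comparison (objective: simpler; same asymptotic cost).

-- ===== PORT A =====
-- `for i1 in range(i1+1, n): if s[i1] != s[i1-1]: break` — cur tracks the loop variable's
-- last value (Python leaves it at n-1 when no break fires, at the old i when the range is empty).
def advGo (l : List Char) (cur j n : Nat) : Nat :=
  if j < n then
    if l[j]? ≠ l[j-1]? then j else advGo l j (j+1) n
  else cur
termination_by n - j

def advA (l : List Char) (i n : Nat) : Nat := advGo l i (i+1) n

-- facts cited by loopA's termination proof
theorem advGo_ge (l : List Char) (cur j n : Nat) (h : cur ≤ j) : cur ≤ advGo l cur j n := by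
  rw [advGo]
  by_cases hj : j < n
  · rw [if_pos hj]
    by_cases hc : l[j]? ≠ l[j-1]?
    · rw [if_pos hc]; exact h
    · rw [if_neg hc]
      exact le_trans h (advGo_ge l j (j+1) n (by omega))
  · rw [if_neg hj]
termination_by n - j
decreasing_by omega

theorem advA_ge (l : List Char) (i n : Nat) : i ≤ advA l i n :=
  advGo_ge l i (i+1) n (by omega)

theorem advA_gt (l : List Char) (i n : Nat) (h : i + 1 < n) : i < advA l i n := by
  rw [advA, advGo, if_pos h]
  by_cases hc : l[i+1]? ≠ l[(i+1)-1]?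
  · rw [if_pos hc]; omega
  · rw [if_neg hc]
    have := advGo_ge l (i+1) (i+1+1) n (by omega)
    omega

-- the `while True` loop of A over the two pointers; the dite guard only makes it total
-- (under Pre_ both indices stay in range, matching Python)
def loopA (l1 l2 : List Char) (i1 i2 : Nat) : Bool :=
  if h : i1 < l1.length ∧ i2 < l2.length then
    if l1[i1]? ≠ l2[i2]? then false
    else if hend : i1 = l1.length - 1 ∧ i2 = l2.length - 1 then true
    else loopA l1 l2 (advA l1 i1 l1.length) (advA l2 i2 l2.length)
  else false
termination_by l1.length - i1 + (l2.length - i2)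
decreasing_by
  have g1 := advA_ge l1 i1 l1.length
  have g2 := advA_ge l2 i2 l2.length
  have hne : i1 ≠ l1.length - 1 ∨ i2 ≠ l2.length - 1 := by tauto
  cases hne with
  | inl hx => have := advA_gt l1 i1 l1.length (by omega); omega
  | inr hx => have := advA_gt l2 i2 l2.length (by omega); omega

def repr_is_equal (s1 : String) (s2 : String) : Bool :=
  loopA s1.toList s2.toList 0 0

-- ===== PORT B =====
-- `for ch in s[1:]: if ch != out[-1]: out += ch`
def collapseGo (out : List Char) (l : List Char) : List Char :=
  match l with
  | [] => out
  | c :: rest =>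
    if out.getLast? ≠ some c then collapseGo (out ++ [c]) rest else collapseGo out rest

-- `out = s[0]` raises IndexError on empty input in Source B; that input is outside Pre_, [] is junk
def collapseB (l : List Char) : List Char :=
  match l with
  | [] => []
  | c :: rest => collapseGo [c] rest

def repr_is_equal_alt (s1 : String) (s2 : String) : Bool :=
  collapseB s1.toList == collapseB s2.toList

-- ===== PRECONDITION & SPEC =====
-- A indexes s1[0]/s2[0] unconditionally, so it raises IndexError iff either string is empty
def Pre_repr_is_equal (s1 : String) (s2 : String) : Prop := s1 ≠ "" ∧ s2 ≠ ""
instance (s1 : String) (s2 : String) : Decidable (Pre_repr_is_equal s1 s2) := by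
  unfold Pre_repr_is_equal; infer_instance

def pvWitness_repr_is_equal : String × String := ("aab", "ab")

def Spec_repr_is_equal (s1 : String) (s2 : String) (out : Bool) : Prop := out = repr_is_equal_alt s1 s2
instance (s1 : String) (s2 : String) (out : Bool) : Decidable (Spec_repr_is_equal s1 s2 out) := by unfold Spec_repr_is_equal; infer_instance

-- ===== CLAIM (what is proved, stated in full; the proofs are below) =====
def Claim_equal_repr_is_equal : Prop := ∀ (s1 : String) (s2 : String), Dom_repr_is_equal s1 s2 → Pre_repr_is_equal s1 s2 → Spec_repr_is_equal s1 s2 (repr_is_equal s1 s2)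

-- ===== LEMMAS AND PROOFS =====

theorem advGo_lt (l : List Char) (cur j n : Nat) (h : cur < n) : advGo l cur j n < n := by
  rw [advGo]
  by_cases hj : j < n
  · rw [if_pos hj]
    by_cases hc : l[j]? ≠ l[j-1]?
    · rw [if_pos hc]; exact hj
    · rw [if_neg hc]
      exact advGo_lt l j (j+1) n hj
  · rw [if_neg hj]; exact h
termination_by n - j
decreasing_by omega

theorem advA_lt (l : List Char) (i n : Nat) (h : i < n) : advA l i n < n :=
  advGo_lt l i (i+1) n h

-- run-collapse of l given that the previously emitted character is p
def rc (p : Char) : List Char → List Char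
  | [] => []
  | a :: t => if a = p then rc p t else a :: rc a t

-- run-collapse of a whole list
def col : List Char → List Char
  | [] => []
  | a :: t => a :: rc a t

theorem collapseGo_eq (l : List Char) : ∀ (out : List Char) (c : Char),
    out.getLast? = some c → collapseGo out l = out ++ rc c l := by
  induction l with
  | nil => intro out c _; simp [collapseGo, rc]
  | cons a t ih =>
    intro out c h
    by_cases hac : a = c
    · subst hac
      have hne : ¬ (out.getLast? ≠ some a) := by simp [h]
      rw [collapseGo, if_neg hne, ih out a h]
      simp [rc]
    · have hne : out.getLast? ≠ some a := by rw [h]; simp [Ne.symm hac]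
      rw [collapseGo, if_pos hne, ih (out ++ [a]) a (by simp)]
      simp [rc, hac]

theorem collapseB_eq_col (l : List Char) : collapseB l = col l := by
  cases l with
  | nil => rfl
  | cons a t =>
    show collapseGo [a] t = col (a :: t)
    rw [collapseGo_eq t [a] a (by simp)]
    simp [col]

theorem col_cons (l : List Char) (i : Nat) (h : i < l.length) :
    col (l.drop i) = l[i] :: rc l[i] (l.drop (i+1)) := by
  rw [List.drop_eq_getElem_cons h]; rfl

-- one run-internal step: advancing past an equal character keeps the collapsed suffix;
-- reaching a different character peels one collapsed element off
theorem col_step (l : List Char) (i : Nat) (h1 : i + 1 < l.length) :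
    col (l.drop i) =
      if l[i+1] = l[i] then col (l.drop (i+1)) else l[i] :: col (l.drop (i+1)) := by
  have h : i < l.length := by omega
  rw [List.drop_eq_getElem_cons h, List.drop_eq_getElem_cons h1]
  by_cases he : l[i+1] = l[i] <;> simp [col, rc, he]

-- what the for-loop advance does to the collapsed suffix
theorem adv_spec (l : List Char) (i : Nat) (h : i < l.length) :
    (col (l.drop i) = [l[i]!] ∧ col (l.drop (advA l i l.length)) = [l[i]!]) ∨
    (col (l.drop i) = l[i]! :: col (l.drop (advA l i l.length)) ∧
      l[advA l i l.length]! ≠ l[i]!) := by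
  rw [advA, advGo]
  by_cases hj : i + 1 < l.length
  · rw [if_pos hj]
    have e0 : l[i]! = l[i] := getElem!_pos l i h
    have e1 : l[i+1]! = l[i+1] := getElem!_pos l (i+1) hj
    by_cases hc : l[i+1]? ≠ l[(i+1)-1]?
    · rw [if_pos hc]
      have hne : l[i+1] ≠ l[i] := by
        simp only [Nat.add_sub_cancel] at hc
        rw [List.getElem?_eq_getElem hj, List.getElem?_eq_getElem h] at hc
        simpa using hc
      right
      refine ⟨?_, by rw [e0, e1]; exact hne⟩
      rw [col_step l i hj, if_neg hne, e0]
    · rw [if_neg hc]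
      have heq : l[i+1] = l[i] := by
        simp only [Nat.add_sub_cancel] at hc
        rw [List.getElem?_eq_getElem hj, List.getElem?_eq_getElem h] at hc
        simpa using hc
      have hcol : col (l.drop i) = col (l.drop (i+1)) := by
        rw [col_step l i hj, if_pos heq]
      have hget : l[i+1]! = l[i]! := by rw [e0, e1, heq]
      have ihres := adv_spec l (i+1) hj
      rw [advA] at ihres
      rcases ihres with ⟨a1, b1⟩ | ⟨a1, b1⟩
      · exact Or.inl ⟨by rw [hcol, a1, hget], by rw [b1, hget]⟩
      · refine Or.inr ⟨by rw [hcol, a1, hget], ?_⟩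
        rw [hget] at b1; exact b1
  · rw [if_neg hj]
    have hsing : l.drop i = [l[i]] := by
      rw [List.drop_eq_getElem_cons h, List.drop_eq_nil_iff.mpr (by omega)]
    have : col (l.drop i) = [l[i]!] := by
      rw [hsing, getElem!_pos l i h]; rfl
    exact Or.inl ⟨this, this⟩
termination_by l.length - i
decreasing_by omega

theorem loopA_spec (N : Nat) (l1 l2 : List Char) (i1 i2 : Nat)
    (hN : l1.length - i1 + (l2.length - i2) ≤ N) (h1 : i1 < l1.length) (h2 : i2 < l2.length) :
    loopA l1 l2 i1 i2 = (col (l1.drop i1) == col (l2.drop i2)) := by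
  rw [loopA, dif_pos ⟨h1, h2⟩]
  by_cases hne : l1[i1]? ≠ l2[i2]?
  · rw [if_pos hne]
    have hd : l1[i1] ≠ l2[i2] := by
      rw [List.getElem?_eq_getElem h1, List.getElem?_eq_getElem h2] at hne
      simpa using hne
    symm
    rw [beq_eq_false_iff_ne]
    intro hcontra
    rw [col_cons l1 i1 h1, col_cons l2 i2 h2] at hcontra
    exact hd (by injection hcontra)
  · have heads : l1[i1] = l2[i2] := by
      rw [List.getElem?_eq_getElem h1, List.getElem?_eq_getElem h2] at hne
      simpa using hne
    rw [if_neg hne]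
    by_cases hend : i1 = l1.length - 1 ∧ i2 = l2.length - 1
    · rw [dif_pos hend]
      have e1 : l1.drop i1 = [l1[i1]] := by
        rw [List.drop_eq_getElem_cons h1, List.drop_eq_nil_iff.mpr (by omega)]
      have e2 : l2.drop i2 = [l2[i2]] := by
        rw [List.drop_eq_getElem_cons h2, List.drop_eq_nil_iff.mpr (by omega)]
      rw [e1, e2, heads]
      simp
    · rw [dif_neg hend]
      have ha1 := adv_spec l1 i1 h1
      have ha2 := adv_spec l2 i2 h2
      have g1 := advA_ge l1 i1 l1.length
      have g2 := advA_ge l2 i2 l2.length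
      have gj1 : advA l1 i1 l1.length < l1.length := advA_lt l1 i1 l1.length h1
      have gj2 : advA l2 i2 l2.length < l2.length := advA_lt l2 i2 l2.length h2
      have hlt : l1.length - advA l1 i1 l1.length + (l2.length - advA l2 i2 l2.length)
          < l1.length - i1 + (l2.length - i2) := by
        rcases not_and_or.mp hend with hx | hx
        · have := advA_gt l1 i1 l1.length (by omega); omega
        · have := advA_gt l2 i2 l2.length (by omega); omega
      rw [loopA_spec (N-1) l1 l2 _ _ (by omega) gj1 gj2]
      rw [Bool.eq_iff_iff]
      simp only [beq_iff_eq]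
      have e10 : l1[i1]! = l1[i1] := getElem!_pos l1 i1 h1
      have e20 : l2[i2]! = l2[i2] := getElem!_pos l2 i2 h2
      rw [e10] at ha1
      rw [e20, ← heads] at ha2
      have hc1 := col_cons l1 _ gj1
      have hc2 := col_cons l2 _ gj2
      have ej1 : l1[advA l1 i1 l1.length]! = l1[advA l1 i1 l1.length] := getElem!_pos l1 _ gj1
      have ej2 : l2[advA l2 i2 l2.length]! = l2[advA l2 i2 l2.length] := getElem!_pos l2 _ gj2
      rw [ej1] at ha1
      rw [ej2] at ha2
      rcases ha1 with ⟨a1, b1⟩ | ⟨a1, b1⟩ <;> rcases ha2 with ⟨a2, b2⟩ | ⟨a2, b2⟩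
      · rw [a1, a2, b1, b2]
      · rw [a1, a2, b1]
        constructor
        · intro hx
          rw [hc2] at hx
          injection hx with hh _
          exact absurd hh.symm b2
        · intro hx
          injection hx with _ ht
          rw [hc2] at ht
          simp at ht
      · rw [a1, a2, b2]
        constructor
        · intro hx
          rw [hc1] at hx
          injection hx with hh _
          exact absurd hh b1
        · intro hx
          injection hx with _ ht
          rw [hc1] at ht
          simp at ht
      · rw [a1, a2]
        simp
termination_by N
decreasing_by omega

-- ===== VERDICT (by name: the statement is the Claim_ definition above) =====
theorem repr_is_equal_spec : Claim_equal_repr_is_equal := by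
  intro s1 s2 _ hpre
  unfold Spec_repr_is_equal repr_is_equal repr_is_equal_alt
  obtain ⟨h1, h2⟩ := hpre
  have n1 : s1.toList ≠ [] := by simp [String.toList_eq_nil_iff, h1]
  have n2 : s2.toList ≠ [] := by simp [String.toList_eq_nil_iff, h2]
  have p1 : 0 < s1.toList.length := List.length_pos_of_ne_nil n1
  have p2 : 0 < s2.toList.length := List.length_pos_of_ne_nil n2
  rw [loopA_spec (s1.toList.length + s2.toList.length) s1.toList s2.toList 0 0 (by omega) p1 p2]
  simp [collapseB_eq_col]
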